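-- pv_equiv track=rewrite | github.com/kaizen-mcv/pubmed_db | scripts/sync_snomed_specialties.py | compare_specialties
-- ===== SOURCE A (Python) =====
-- from typing import Dict, List, Set, Tuple
--
-- def compare_specialties(
--     fhir: Dict[str, str],
--     local: Dict[str, Tuple[str, str, str, bool]]
-- ) -> Tuple[List, List, List, List]:
--     """
--     Compara especialidades FHIR con locales.
--
--     Returns:
--         (nuevas, eliminadas, modificadas_name_en, sin_name_snomed)
--     """
--     fhir_codes = set(fhir.keys())
--     local_codes = set(local.keys())
--
--     # Nuevas en FHIR (no están en local)
--     new_codes = fhir_codes - local_codes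
--     nuevas = [(code, fhir[code]) for code in sorted(new_codes)]
--
--     # Eliminadas de FHIR (están en local pero no en FHIR)
--     removed_codes = local_codes - fhir_codes
--     eliminadas = [(code, local[code][0]) for code in sorted(removed_codes)]
--
--     # Detectar las que no tienen name_snomed poblado
--     # NO modificamos name_en - ese es nuestro nombre simplificado
--     common_codes = fhir_codes & local_codes
--     modificadas = []  # Solo si hay cambios reales futuros en el estándar
--     sin_name_snomed = []
--
--     for code in sorted(common_codes):
--         fhir_name = fhir[code]
--         name_en, name_snomed, name_es, is_mir = local[code]
--
--         # Si no tiene name_snomed, añadir a la lista para poblar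
--         if name_snomed is None:
--             sin_name_snomed.append((code, fhir_name))
--         # Si tiene name_snomed pero difiere del FHIR actual (cambio en estándar)
--         elif name_snomed != fhir_name:
--             modificadas.append((code, name_snomed, fhir_name))
--
--     return nuevas, eliminadas, modificadas, sin_name_snomed
-- ===== SOURCE B (Python) =====
-- def compare_specialties(fhir, local):
--     """Single sorted pass over the union of key sets, dispatching each code
--     into one of four buckets by membership."""
--     nuevas, eliminadas, modificadas, sin_name_snomed = [], [], [], []
--     for code in sorted(set(fhir) | set(local)):
--         if code not in local:
--             nuevas.append((code, fhir[code]))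
--         elif code not in fhir:
--             eliminadas.append((code, local[code][0]))
--         else:
--             name_en, name_snomed, name_es, is_mir = local[code]
--             if name_snomed is None:
--                 sin_name_snomed.append((code, fhir[code]))
--             elif name_snomed != fhir[code]:
--                 modificadas.append((code, name_snomed, fhir[code]))
--     return nuevas, eliminadas, modificadas, sin_name_snomed
-- ===== Notes on version B (the rewrite author's own statement) =====
-- stated objective: alternative
-- what changed: A builds three derived key sets (difference, reverse difference, intersection) and runs three separate sorted passes; B sorts the union of the key sets once and dispatches each code into one of the four buckets by two membership tests in a single pass.
import Mathlib
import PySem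

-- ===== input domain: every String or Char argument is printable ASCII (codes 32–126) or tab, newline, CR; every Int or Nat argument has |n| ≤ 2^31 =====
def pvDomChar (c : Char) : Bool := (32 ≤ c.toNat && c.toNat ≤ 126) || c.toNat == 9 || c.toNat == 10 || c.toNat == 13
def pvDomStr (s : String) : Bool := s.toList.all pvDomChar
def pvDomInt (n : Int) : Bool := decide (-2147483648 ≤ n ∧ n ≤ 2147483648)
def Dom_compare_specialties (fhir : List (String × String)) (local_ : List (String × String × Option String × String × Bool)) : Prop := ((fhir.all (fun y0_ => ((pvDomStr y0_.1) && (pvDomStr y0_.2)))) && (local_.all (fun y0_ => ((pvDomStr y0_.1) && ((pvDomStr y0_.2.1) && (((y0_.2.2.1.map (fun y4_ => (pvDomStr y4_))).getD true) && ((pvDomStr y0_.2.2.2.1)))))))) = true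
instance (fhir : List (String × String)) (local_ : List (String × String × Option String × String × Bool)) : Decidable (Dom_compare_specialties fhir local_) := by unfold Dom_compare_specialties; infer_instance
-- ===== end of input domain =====

-- B replaces A's three separate set-difference/intersection sorted passes by ONE sorted pass
-- over the union of the key sets, dispatching each code into a bucket by membership
-- (objective: alternative decomposition, same O(n log n) cost).
-- The dict arguments are modelled as association lists read through PySem.Dict.ofList
-- (Python dict construction: duplicate keys keep the first position, last value).

-- ===== PORT A =====
def compare_specialties (fhir : List (String × String)) (local_ : List (String × String × Option String × String × Bool)) : (List (String × String)) × (List (String × String)) × (List (String × String × String)) × (List (String × String)) :=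
  let fd := PySem.Dict.ofList fhir
  let ld := PySem.Dict.ofList local_
  let fhir_codes := PySem.Set.ofList (PySem.Dict.keys fd)
  let local_codes := PySem.Set.ofList (PySem.Dict.keys ld)
  let new_codes := PySem.Set.diff fhir_codes local_codes
  -- fhir[code] with code ∈ fhir: getD's default is never read
  let nuevas := (PySem.List.sorted new_codes (fun x => x)).map
    (fun code => (code, PySem.Dict.getD fd code ""))
  let removed_codes := PySem.Set.diff local_codes fhir_codes
  let eliminadas := (PySem.List.sorted removed_codes (fun x => x)).map
    (fun code => (code, (PySem.Dict.getD ld code ("", none, "", false)).1))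
  let common_codes := PySem.Set.inter fhir_codes local_codes
  let res := (PySem.List.sorted common_codes (fun x => x)).foldl
    (fun (acc : List (String × String × String) × List (String × String)) code =>
      let fhir_name := PySem.Dict.getD fd code ""
      let t := PySem.Dict.getD ld code ("", none, "", false)
      match t.2.1 with
      | none => (acc.1, acc.2 ++ [(code, fhir_name)])
      | some name_snomed =>
        if name_snomed ≠ fhir_name then (acc.1 ++ [(code, name_snomed, fhir_name)], acc.2)
        else acc) ([], [])
  (nuevas, eliminadas, res.1, res.2)

-- ===== PORT B =====
def compare_specialties_alt (fhir : List (String × String)) (local_ : List (String × String × Option String × String × Bool)) : (List (String × String)) × (List (String × String)) × (List (String × String × String)) × (List (String × String)) :=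
  let fd := PySem.Dict.ofList fhir
  let ld := PySem.Dict.ofList local_
  let all_codes := PySem.Set.union (PySem.Set.ofList (PySem.Dict.keys fd)) (PySem.Set.ofList (PySem.Dict.keys ld))
  (PySem.List.sorted all_codes (fun x => x)).foldl
    (fun (acc : (List (String × String)) × (List (String × String)) × (List (String × String × String)) × (List (String × String))) code =>
      if !(PySem.Dict.contains ld code) then
        (acc.1 ++ [(code, PySem.Dict.getD fd code "")], acc.2.1, acc.2.2.1, acc.2.2.2)
      else if !(PySem.Dict.contains fd code) then
        (acc.1, acc.2.1 ++ [(code, (PySem.Dict.getD ld code ("", none, "", false)).1)], acc.2.2.1, acc.2.2.2)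
      else
        let t := PySem.Dict.getD ld code ("", none, "", false)
        match t.2.1 with
        | none => (acc.1, acc.2.1, acc.2.2.1, acc.2.2.2 ++ [(code, PySem.Dict.getD fd code "")])
        | some name_snomed =>
          if name_snomed ≠ PySem.Dict.getD fd code "" then
            (acc.1, acc.2.1, acc.2.2.1 ++ [(code, name_snomed, PySem.Dict.getD fd code "")], acc.2.2.2)
          else acc)
    ([], [], [], [])

-- ===== PRECONDITION & SPEC =====
def Spec_compare_specialties (fhir : List (String × String)) (local_ : List (String × String × Option String × String × Bool)) (out : (List (String × String)) × (List (String × String)) × (List (String × String × String)) × (List (String × String))) : Prop := out = compare_specialties_alt fhir local_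
instance (fhir : List (String × String)) (local_ : List (String × String × Option String × String × Bool)) (out : (List (String × String)) × (List (String × String)) × (List (String × String × String)) × (List (String × String))) : Decidable (Spec_compare_specialties fhir local_ out) := by unfold Spec_compare_specialties; infer_instance

-- ===== CLAIM (what is proved, stated in full; the proofs are below) =====
def Claim_equal_compare_specialties : Prop := ∀ (fhir : List (String × String)) (local_ : List (String × String × Option String × String × Bool)), Dom_compare_specialties fhir local_ → Spec_compare_specialties fhir local_ (compare_specialties fhir local_)

-- ===== LEMMAS AND PROOFS =====

-- A strictly sorted rearrangement of a nodup list characterised by membership in a filter.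
theorem sorted_eq_filter_of_mem {p : String → Bool} {L s : List String}
    (hlt : List.Pairwise (fun a b => a < b) L) (hnd : s.Nodup)
    (hm : ∀ x, x ∈ s ↔ (x ∈ L ∧ p x = true)) :
    PySem.List.sorted s (fun x => x) = L.filter p := by
  apply PySem.List.sorted_eq_of_perm_of_pairwise_lt
  · apply List.perm_of_nodup_nodup_toFinset_eq (List.Nodup.filter p (hlt.imp ne_of_lt)) hnd
    ext x
    simp [hm]
  · exact hlt.filter p

-- A's common-codes loop appends its two buckets.
theorem foldlA_eq {α β : Type} (g3 : String → Option α) (g4 : String → Option β)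
    (step : (List α × List β) → String → (List α × List β))
    (hstep : ∀ acc code, step acc code =
      (acc.1 ++ (g3 code).toList, acc.2 ++ (g4 code).toList)) :
    ∀ (l : List String) (m : List α) (s : List β),
      l.foldl step (m, s) = (m ++ l.filterMap g3, s ++ l.filterMap g4) := by
  intro l
  induction l with
  | nil => intro m s; simp
  | cons c t ih =>
    intro m s
    simp only [List.foldl_cons, hstep, List.filterMap_cons]
    rcases h3 : g3 c with _ | a <;> rcases h4 : g4 c with _ | b <;>
      simp [ih, List.append_assoc]

-- B's single loop appends its four buckets.
theorem foldlB_eq {α β γ δ : Type}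
    (g1 : String → Option α) (g2 : String → Option β) (g3 : String → Option γ) (g4 : String → Option δ)
    (step : (List α × List β × List γ × List δ) → String → (List α × List β × List γ × List δ))
    (hstep : ∀ acc code, step acc code =
      (acc.1 ++ (g1 code).toList, acc.2.1 ++ (g2 code).toList,
       acc.2.2.1 ++ (g3 code).toList, acc.2.2.2 ++ (g4 code).toList)) :
    ∀ (l : List String) (a : List α) (b : List β) (m : List γ) (s : List δ),
      l.foldl step (a, b, m, s) =
        (a ++ l.filterMap g1, b ++ l.filterMap g2, m ++ l.filterMap g3, s ++ l.filterMap g4) := by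
  intro l
  induction l with
  | nil => intro a b m s; simp
  | cons c t ih =>
    intro a b m s
    simp only [List.foldl_cons, hstep, List.filterMap_cons]
    rcases h1 : g1 c with _ | x1 <;> rcases h2 : g2 c with _ | x2 <;>
      rcases h3 : g3 c with _ | x3 <;> rcases h4 : g4 c with _ | x4 <;>
      simp [ih, List.append_assoc]

-- Guarded filterMap = filter then filterMap.
theorem filterMap_guard {α : Type} (q : String → Bool) (g : String → Option α) :
    ∀ (l : List String),
      l.filterMap (fun c => if q c then g c else none) = (l.filter q).filterMap g := by
  intro l
  induction l with
  | nil => rfl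
  | cons c t ih =>
    by_cases h : q c <;> simp [List.filterMap_cons, h, ih]

theorem filterMap_guard_not {α : Type} (q : String → Bool) (g : String → Option α) :
    ∀ (l : List String),
      l.filterMap (fun c => if q c then none else g c) = (l.filter (fun c => !(q c))).filterMap g := by
  intro l
  induction l with
  | nil => rfl
  | cons c t ih =>
    by_cases h : q c <;> simp [List.filterMap_cons, h, ih]

theorem filterMap_guard_map {α : Type} (q : String → Bool) (f : String → α) :
    ∀ (l : List String),
      l.filterMap (fun c => if q c then some (f c) else none) = (l.filter q).map f := by
  intro l
  rw [filterMap_guard q (fun c => some (f c)) l]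
  simp

-- ===== VERDICT (by name: the statement is the Claim_ definition above) =====
theorem compare_specialties_spec : Claim_equal_compare_specialties := by
  intro fhir local_ _
  unfold Spec_compare_specialties
  -- abbreviations shared by the two ports
  set fd := PySem.Dict.ofList fhir with hfd
  set ld := PySem.Dict.ofList local_ with hld
  set F := PySem.Set.ofList (PySem.Dict.keys fd) with hF
  set Ld := PySem.Set.ofList (PySem.Dict.keys ld) with hLd
  set U := PySem.Set.union F Ld with hU
  set L := PySem.List.sorted U (fun x => x) with hLdef
  -- L is strictly increasing
  have hUnd : U.Nodup := PySem.Set.nodup_union F Ld (PySem.Set.nodup_ofList _)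
  have hLnd : L.Nodup := ((PySem.List.sorted_perm U (fun x => x) false).nodup_iff).mpr hUnd
  have hlt : List.Pairwise (fun a b : String => a < b) L :=
    ((PySem.List.sorted_pairwise U (fun x => x)).and hLnd).imp
      (fun h => lt_of_le_of_ne h.1 h.2)
  have hmemL : ∀ x, x ∈ L ↔ (x ∈ PySem.Dict.keys fd ∨ x ∈ PySem.Dict.keys ld) := by
    intro x
    rw [hLdef, PySem.List.mem_sorted, hU, PySem.Set.mem_union, hF, hLd,
      PySem.Set.mem_ofList, PySem.Set.mem_ofList]
  have hcf : ∀ x, PySem.Dict.contains fd x = true ↔ x ∈ PySem.Dict.keys fd :=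
    fun x => PySem.Dict.contains_iff_mem_keys fd x
  have hcl : ∀ x, PySem.Dict.contains ld x = true ↔ x ∈ PySem.Dict.keys ld :=
    fun x => PySem.Dict.contains_iff_mem_keys ld x
  have hcff : ∀ x, x ∉ PySem.Dict.keys fd → PySem.Dict.contains fd x = false := by
    intro x hx
    cases hc : PySem.Dict.contains fd x
    · rfl
    · exact absurd ((hcf x).mp hc) hx
  have hclf : ∀ x, x ∉ PySem.Dict.keys ld → PySem.Dict.contains ld x = false := by
    intro x hx
    cases hc : PySem.Dict.contains ld x
    · rfl
    · exact absurd ((hcl x).mp hc) hx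
  -- the three sorted passes of A are filters of L
  have h1 : PySem.List.sorted (PySem.Set.diff F Ld) (fun x => x)
      = L.filter (fun c => !(PySem.Dict.contains ld c)) := by
    apply sorted_eq_filter_of_mem hlt
      (PySem.Set.nodup_diff F Ld (PySem.Set.nodup_ofList _))
    intro x
    rw [PySem.Set.mem_diff, hF, hLd, PySem.Set.mem_ofList, PySem.Set.mem_ofList]
    constructor
    · rintro ⟨hxf, hxl⟩
      exact ⟨(hmemL x).mpr (Or.inl hxf), by simp [hclf x hxl]⟩
    · rintro ⟨hxL, hxp⟩
      have hxl : x ∉ PySem.Dict.keys ld := by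
        intro hc; rw [← hcl x] at hc; simp [hc] at hxp
      exact ⟨((hmemL x).mp hxL).resolve_right hxl, hxl⟩
  have h2 : PySem.List.sorted (PySem.Set.diff Ld F) (fun x => x)
      = L.filter (fun c => PySem.Dict.contains ld c && !(PySem.Dict.contains fd c)) := by
    apply sorted_eq_filter_of_mem hlt
      (PySem.Set.nodup_diff Ld F (PySem.Set.nodup_ofList _))
    intro x
    rw [PySem.Set.mem_diff, hLd, hF, PySem.Set.mem_ofList, PySem.Set.mem_ofList]
    constructor
    · rintro ⟨hxl, hxf⟩
      refine ⟨(hmemL x).mpr (Or.inr hxl), ?_⟩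
      simp [(hcl x).mpr hxl, hcff x hxf]
    · rintro ⟨_, hxp⟩
      simp only [Bool.and_eq_true, Bool.not_eq_true'] at hxp
      refine ⟨(hcl x).mp hxp.1, fun hc => ?_⟩
      rw [← hcf x] at hc; rw [hc] at hxp; exact absurd hxp.2 (by simp)
  have h3 : PySem.List.sorted (PySem.Set.inter F Ld) (fun x => x)
      = L.filter (fun c => PySem.Dict.contains ld c && PySem.Dict.contains fd c) := by
    apply sorted_eq_filter_of_mem hlt
      (PySem.Set.nodup_inter F Ld (PySem.Set.nodup_ofList _))
    intro x
    rw [PySem.Set.mem_inter, hF, hLd, PySem.Set.mem_ofList, PySem.Set.mem_ofList]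
    constructor
    · rintro ⟨hxf, hxl⟩
      exact ⟨(hmemL x).mpr (Or.inl hxf), by simp [(hcl x).mpr hxl, (hcf x).mpr hxf]⟩
    · rintro ⟨_, hxp⟩
      simp only [Bool.and_eq_true] at hxp
      exact ⟨(hcf x).mp hxp.2, (hcl x).mp hxp.1⟩
  -- the bucket extractors
  have hB := foldlB_eq
    (fun c => if !(PySem.Dict.contains ld c) then some (c, PySem.Dict.getD fd c "") else none)
    (fun c => if !(PySem.Dict.contains ld c) then none
      else if !(PySem.Dict.contains fd c) then some (c, (PySem.Dict.getD ld c ("", none, "", false)).1) else none)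
    (fun c => if !(PySem.Dict.contains ld c) then none
      else if !(PySem.Dict.contains fd c) then none
      else match (PySem.Dict.getD ld c ("", none, "", false)).2.1 with
        | none => none
        | some ns => if ns ≠ PySem.Dict.getD fd c "" then some (c, ns, PySem.Dict.getD fd c "") else none)
    (fun c => if !(PySem.Dict.contains ld c) then none
      else if !(PySem.Dict.contains fd c) then none
      else match (PySem.Dict.getD ld c ("", none, "", false)).2.1 with
        | none => some (c, PySem.Dict.getD fd c "")
        | some _ => none)
    (fun acc code =>
      if !(PySem.Dict.contains ld code) then
        (acc.1 ++ [(code, PySem.Dict.getD fd code "")], acc.2.1, acc.2.2.1, acc.2.2.2)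
      else if !(PySem.Dict.contains fd code) then
        (acc.1, acc.2.1 ++ [(code, (PySem.Dict.getD ld code ("", none, "", false)).1)], acc.2.2.1, acc.2.2.2)
      else
        let t := PySem.Dict.getD ld code ("", none, "", false)
        match t.2.1 with
        | none => (acc.1, acc.2.1, acc.2.2.1, acc.2.2.2 ++ [(code, PySem.Dict.getD fd code "")])
        | some name_snomed =>
          if name_snomed ≠ PySem.Dict.getD fd code "" then
            (acc.1, acc.2.1, acc.2.2.1 ++ [(code, name_snomed, PySem.Dict.getD fd code "")], acc.2.2.2)
          else acc)
    (by
      intro acc code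
      by_cases hl : PySem.Dict.contains ld code
      · by_cases hf : PySem.Dict.contains fd code
        · rcases hs : (PySem.Dict.getD ld code ("", none, "", false)).2.1 with _ | ns
          · simp [hl, hf, hs]
          · by_cases hne : ns = PySem.Dict.getD fd code ""
            · simp [hl, hf, hs, hne]
            · simp [hl, hf, hs, hne]
        · simp [hl, hf]
      · simp [hl])
    L [] [] [] []
  have hA := foldlA_eq
    (fun c => match (PySem.Dict.getD ld c ("", none, "", false)).2.1 with
      | none => none
      | some ns => if ns ≠ PySem.Dict.getD fd c "" then some (c, ns, PySem.Dict.getD fd c "") else none)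
    (fun c => match (PySem.Dict.getD ld c ("", none, "", false)).2.1 with
      | none => some (c, PySem.Dict.getD fd c "")
      | some _ => none)
    (fun (acc : List (String × String × String) × List (String × String)) code =>
      let fhir_name := PySem.Dict.getD fd code ""
      let t := PySem.Dict.getD ld code ("", none, "", false)
      match t.2.1 with
      | none => (acc.1, acc.2 ++ [(code, fhir_name)])
      | some name_snomed =>
        if name_snomed ≠ fhir_name then (acc.1 ++ [(code, name_snomed, fhir_name)], acc.2)
        else acc)
    (by
      intro acc code
      rcases hs : (PySem.Dict.getD ld code ("", none, "", false)).2.1 with _ | ns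
      · simp [hs]
      · by_cases hne : ns = PySem.Dict.getD fd code ""
        · simp [hs, hne]
        · simp [hs, hne])
    (PySem.List.sorted (PySem.Set.inter F Ld) (fun x => x)) [] []
  -- assemble
  show compare_specialties fhir local_ = _
  unfold compare_specialties compare_specialties_alt
  simp only []
  rw [← hfd, ← hld, ← hF, ← hLd, ← hU, ← hLdef]
  rw [hA, hB]
  refine Prod.ext ?_ (Prod.ext ?_ (Prod.ext ?_ ?_)) <;> simp only
  · rw [h1, filterMap_guard_map, List.nil_append]
  · rw [h2, filterMap_guard_not, filterMap_guard_map, List.filter_filter, List.nil_append]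
    congr 1
    apply List.filter_congr
    intro c _
    simp [Bool.and_comm]
  · rw [h3, filterMap_guard_not, filterMap_guard_not, List.filter_filter, List.nil_append]
    congr 1
    apply List.filter_congr
    intro c _
    simp [Bool.and_comm]
  · rw [h3, filterMap_guard_not, filterMap_guard_not, List.filter_filter, List.nil_append]
    congr 1
    apply List.filter_congr
    intro c _
    simp [Bool.and_comm]
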